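-- pv_equiv track=rewrite | github.com/child-play-neurips/child-play | lcl_experiments/test.py | is_valid_construct
-- ===== SOURCE A (Python) =====
-- def is_valid_construct(pieces):
--     occupied_positions = {}
--     for x, y, color in pieces:
--         # Create a set of x positions for each piece based on its width (4 studs)
--         piece_positions = set(range(x, x + 4))
--         if y in occupied_positions:
--             # Check for any overlap in x positions with existing pieces at the same y level
--             if any(pos in occupied_positions[y] for pos in piece_positions):
--                 return False  # Overlap detected
--             occupied_positions[y].update(piece_positions)
--         else:
--             # Initialize occupied positions for this y level
--             occupied_positions[y] = set(piece_positions)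
--     return True
-- ===== SOURCE B (Python) =====
-- def is_valid_construct(pieces):
--     # Group x-starts by row, then per row sort and check consecutive gaps:
--     # equal-width (4-stud) pieces overlap iff some adjacent sorted pair is closer than 4.
--     rows = {}
--     for x, y, _ in pieces:
--         rows[y] = rows.get(y, []) + [x]
--     for xs in rows.values():
--         s = sorted(xs)
--         for a, b in zip(s, s[1:]):
--             if b - a < 4:
--                 return False
--     return True
-- ===== Notes on version B (the rewrite author's own statement) =====
-- stated objective: alternative
-- what changed: Replaces the incremental per-position occupied-set membership test with grouping x-starts by row once, then sorting each row and scanning consecutive pairs for a gap < 4.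
import Mathlib
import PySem

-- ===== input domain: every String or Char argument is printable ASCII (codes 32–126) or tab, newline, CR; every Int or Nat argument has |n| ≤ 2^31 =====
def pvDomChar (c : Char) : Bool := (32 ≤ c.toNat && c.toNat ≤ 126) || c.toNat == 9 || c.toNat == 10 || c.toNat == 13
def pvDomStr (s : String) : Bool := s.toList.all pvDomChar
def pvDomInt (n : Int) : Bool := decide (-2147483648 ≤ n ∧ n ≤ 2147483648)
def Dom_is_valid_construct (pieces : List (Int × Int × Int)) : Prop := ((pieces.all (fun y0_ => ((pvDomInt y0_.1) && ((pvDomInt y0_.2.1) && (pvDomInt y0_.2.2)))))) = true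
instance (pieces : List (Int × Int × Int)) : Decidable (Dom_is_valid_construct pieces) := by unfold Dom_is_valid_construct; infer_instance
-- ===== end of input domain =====

-- B replaces A's incremental per-position occupied-set membership check by grouping the
-- x-starts per row once, sorting each row and scanning consecutive pairs for a gap < 4
-- (alternative algorithm, same return value on every input).

-- ===== PORT A =====
-- the 'for x, y, color in pieces' loop with its early 'return False'
def pvLoopA : List (Int × Int × Int) → PySem.Dict Int (PySem.Set Int) → Bool
  | [], _ => true
  | (x, y, _) :: rest, occ =>
    -- piece_positions = set(range(x, x + 4))
    let pos : PySem.Set Int := PySem.Set.ofList (PySem.List.pyRange x (x + 4) 1)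
    if occ.contains y then
      let s : PySem.Set Int := (occ.get? y).getD PySem.Set.empty
      if pos.any (fun p => PySem.Set.contains s p) then false
      else pvLoopA rest (occ.insert y (PySem.Set.update s pos))
    else
      pvLoopA rest (occ.insert y (PySem.Set.ofList pos))

def is_valid_construct (pieces : List (Int × Int × Int)) : Bool :=
  pvLoopA pieces PySem.Dict.empty

-- ===== PORT B =====
-- inner scan: 'for a, b in zip(s, s[1:]): if b - a < 4: return False' (s[1:] on a list = drop 1)
def pvRowOK (xs : List Int) : Bool :=
  let s := PySem.List.sorted xs (fun v => v) false
  (s.zip (s.drop 1)).all (fun ab => !(ab.2 - ab.1 < 4))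

def is_valid_construct_alt (pieces : List (Int × Int × Int)) : Bool :=
  -- rows[y] = rows.get(y, []) + [x]
  let rows : PySem.Dict Int (List Int) :=
    pieces.foldl (fun d t => d.modify t.2.1 [] (· ++ [t.1])) PySem.Dict.empty
  rows.values.all pvRowOK

-- ===== PRECONDITION & SPEC =====
def Spec_is_valid_construct (pieces : List (Int × Int × Int)) (out : Bool) : Prop := out = is_valid_construct_alt pieces
instance (pieces : List (Int × Int × Int)) (out : Bool) : Decidable (Spec_is_valid_construct pieces out) := by unfold Spec_is_valid_construct; infer_instance

-- ===== CLAIM (what is proved, stated in full; the proofs are below) =====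
def Claim_equal_is_valid_construct : Prop := ∀ (pieces : List (Int × Int × Int)), Dom_is_valid_construct pieces → Spec_is_valid_construct pieces (is_valid_construct pieces)

-- ===== LEMMAS AND PROOFS =====

-- 'width-4 pieces starting at a and b do not overlap'
def pvOK (a b : Int) : Prop := a + 4 ≤ b ∨ b + 4 ≤ a

-- 'pieces p and q are compatible' (same row → x-intervals disjoint)
def pvR (p q : Int × Int × Int) : Prop := p.2.1 = q.2.1 → pvOK p.1 q.1

-- position p of row y is occupied in state occ
def pvMemOcc (occ : PySem.Dict Int (PySem.Set Int)) (y p : Int) : Prop :=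
  ∃ s, occ.get? y = some s ∧ p ∈ s

-- every piece of l is disjoint from the occupied positions of occ
def pvFresh (l : List (Int × Int × Int)) (occ : PySem.Dict Int (PySem.Set Int)) : Prop :=
  ∀ u ∈ l, ∀ p : Int, u.1 ≤ p → p < u.1 + 4 → ¬ pvMemOcc occ u.2.1 p

-- the x-starts of the pieces of row y, in input order
def pvRow (y : Int) (pieces : List (Int × Int × Int)) : List Int :=
  (pieces.filter (fun t => t.2.1 == y)).map (fun t => t.1)

lemma pvMemOcc_insert (occ : PySem.Dict Int (PySem.Set Int)) (y : Int) (S : PySem.Set Int)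
    (y' p : Int) :
    pvMemOcc (occ.insert y S) y' p ↔ (y' = y ∧ p ∈ S) ∨ (y' ≠ y ∧ pvMemOcc occ y' p) := by
  unfold pvMemOcc
  rw [PySem.Dict.get?_insert]
  by_cases h : y' = y <;> simp [h]

lemma pvStep (t : List (Int × Int × Int)) (occ occ' : PySem.Dict Int (PySem.Set Int))
    (x y c : Int)
    (hocc' : ∀ y' p, pvMemOcc occ' y' p ↔ pvMemOcc occ y' p ∨ (y' = y ∧ x ≤ p ∧ p < x + 4))
    (hfree : ∀ p, x ≤ p → p < x + 4 → ¬ pvMemOcc occ y p) :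
    (List.Pairwise pvR t ∧ pvFresh t occ') ↔
      (List.Pairwise pvR ((x, y, c) :: t) ∧ pvFresh ((x, y, c) :: t) occ) := by
  constructor
  · rintro ⟨hp, hf⟩
    refine ⟨List.pairwise_cons.mpr ⟨?_, hp⟩, ?_⟩
    · intro q hq he
      by_contra hno
      have hov : ∃ p : Int, x ≤ p ∧ p < x + 4 ∧ q.1 ≤ p ∧ p < q.1 + 4 := by
        rcases le_total x q.1 with hle | hle
        · exact ⟨q.1, by unfold pvOK at hno; omega⟩
        · exact ⟨x, by unfold pvOK at hno; omega⟩
      obtain ⟨p, h1, h2, h3, h4⟩ := hov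
      exact hf q hq p h3 h4 ((hocc' _ _).mpr (Or.inr ⟨he.symm, h1, h2⟩))
    · rintro u hu p h1 h2 hm
      rcases List.mem_cons.mp hu with rfl | hu'
      · exact hfree p h1 h2 hm
      · exact hf u hu' p h1 h2 ((hocc' _ _).mpr (Or.inl hm))
  · rintro ⟨hpc, hfc⟩
    obtain ⟨hhd, hp⟩ := List.pairwise_cons.mp hpc
    refine ⟨hp, ?_⟩
    intro u hu p h1 h2 hm'
    rcases (hocc' _ _).mp hm' with hm | ⟨hey, hx1, hx2⟩
    · exact hfc u (List.mem_cons_of_mem _ hu) p h1 h2 hm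
    · have hok : pvOK x u.1 := hhd u hu (by simpa using hey.symm)
      unfold pvOK at hok
      omega

lemma pvMem_pos (x p : Int) :
    p ∈ PySem.Set.ofList (PySem.List.pyRange x (x + 4) 1) ↔ x ≤ p ∧ p < x + 4 := by
  rw [PySem.Set.mem_ofList, PySem.List.mem_pyRange_one]

lemma pvLoopA_iff (pieces : List (Int × Int × Int)) (occ : PySem.Dict Int (PySem.Set Int)) :
    pvLoopA pieces occ = true ↔ List.Pairwise pvR pieces ∧ pvFresh pieces occ := by
  induction pieces generalizing occ with
  | nil => simp [pvLoopA, pvFresh]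
  | cons hd t ih =>
    obtain ⟨x, y, c⟩ := hd
    show (let pos : PySem.Set Int := PySem.Set.ofList (PySem.List.pyRange x (x + 4) 1)
      if occ.contains y then
        let s : PySem.Set Int := (occ.get? y).getD PySem.Set.empty
        if pos.any (fun p => PySem.Set.contains s p) then false
        else pvLoopA t (occ.insert y (PySem.Set.update s pos))
      else pvLoopA t (occ.insert y (PySem.Set.ofList pos))) = true ↔ _
    by_cases hc : occ.contains y
    · obtain ⟨s, hs⟩ : ∃ s, occ.get? y = some s := by
        rw [PySem.Dict.contains_eq_isSome_get?] at hc
        exact Option.isSome_iff_exists.mp hc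
      simp only [if_pos hc, hs, Option.getD_some]
      by_cases hchk :
          (PySem.Set.ofList (PySem.List.pyRange x (x + 4) 1)).any
            (fun p => PySem.Set.contains s p) = true
      · rw [if_pos hchk]
        simp only [Bool.false_eq_true, false_iff]
        rintro ⟨-, hf⟩
        obtain ⟨p, hp, hps⟩ := List.any_eq_true.mp hchk
        have hb := (pvMem_pos x p).mp hp
        exact hf (x, y, c) (List.mem_cons_self) p hb.1 hb.2
          ⟨s, hs, (PySem.Set.contains_iff _ _).mp hps⟩
      · rw [if_neg hchk]
        have hfree : ∀ p : Int, x ≤ p → p < x + 4 → ¬ pvMemOcc occ y p := by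
          intro p h1 h2 ⟨s', hs', hps'⟩
          rw [hs] at hs'
          obtain rfl : s = s' := by injection hs'
          exact hchk (List.any_eq_true.mpr
            ⟨p, (pvMem_pos x p).mpr ⟨h1, h2⟩, (PySem.Set.contains_iff _ _).mpr hps'⟩)
        rw [ih]
        apply pvStep t occ _ x y c _ hfree
        intro y' p
        rw [pvMemOcc_insert, PySem.Set.mem_update, pvMem_pos]
        unfold pvMemOcc
        constructor
        · rintro (⟨rfl, hps | hpos⟩ | ⟨hne, hm⟩)
          · exact Or.inl ⟨s, hs, hps⟩
          · exact Or.inr ⟨rfl, hpos⟩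
          · exact Or.inl hm
        · rintro (⟨s', hs', hps'⟩ | ⟨rfl, hpos⟩)
          · by_cases hy : y' = y
            · subst hy
              rw [hs] at hs'
              obtain rfl : s = s' := by injection hs'
              exact Or.inl ⟨rfl, Or.inl hps'⟩
            · exact Or.inr ⟨hy, s', hs', hps'⟩
          · exact Or.inl ⟨rfl, Or.inr hpos⟩
    · have hnone : occ.get? y = none := by
        rw [PySem.Dict.contains_eq_isSome_get?] at hc
        simpa using hc
      simp only [if_neg hc]
      rw [ih]
      apply pvStep t occ _ x y c _
        (by rintro p _ _ ⟨s', hs', -⟩; rw [hnone] at hs'; simp at hs')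
      intro y' p
      rw [pvMemOcc_insert, PySem.Set.mem_ofList, pvMem_pos]
      unfold pvMemOcc
      constructor
      · rintro (⟨rfl, hpos⟩ | ⟨hne, hm⟩)
        · exact Or.inr ⟨rfl, hpos⟩
        · exact Or.inl hm
      · rintro (⟨s', hs', hps'⟩ | ⟨rfl, hpos⟩)
        · by_cases hy : y' = y
          · subst hy; rw [hnone] at hs'; simp at hs'
          · exact Or.inr ⟨hy, s', hs', hps'⟩
        · exact Or.inl ⟨rfl, hpos⟩

lemma pvA_iff (pieces : List (Int × Int × Int)) :
    is_valid_construct pieces = true ↔ List.Pairwise pvR pieces := by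
  rw [is_valid_construct, pvLoopA_iff]
  have : pvFresh pieces PySem.Dict.empty := by
    rintro u _ p _ _ ⟨s, hs, -⟩
    rw [PySem.Dict.get?_empty] at hs
    simp at hs
  tauto

lemma zipAll (s : List Int) :
    ((s.zip (s.drop 1)).all (fun ab => !(ab.2 - ab.1 < 4)) = true) ↔
      List.IsChain (fun a b => a + 4 ≤ b) s := by
  induction s with
  | nil => simp
  | cons a t ih =>
    cases t with
    | nil => simp
    | cons b t' =>
      simp only [List.drop_succ_cons, List.drop_zero, List.zip_cons_cons, List.all_cons,
        Bool.and_eq_true, List.isChain_cons_cons] at *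
      constructor
      · rintro ⟨h1, h2⟩
        refine ⟨?_, ih.mp h2⟩
        simp at h1; omega
      · rintro ⟨h1, h2⟩
        refine ⟨?_, ih.mpr h2⟩
        simp; omega

lemma rowOK (xs : List Int) :
    pvRowOK xs = true ↔ List.Pairwise pvOK xs := by
  rw [pvRowOK]
  rw [zipAll]
  have hperm := PySem.List.sorted_perm xs (fun v => v) false
  have hle : (PySem.List.sorted xs (fun v => v) false).Pairwise (· ≤ ·) := by
    simpa using PySem.List.sorted_pairwise xs (fun v => v)
  have hsym : ∀ {a b : Int}, pvOK a b → pvOK b a := by intro a b h; unfold pvOK at *; omega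
  rw [← List.Perm.pairwise_iff hsym hperm]
  haveI : Trans (fun a b : Int => a + 4 ≤ b) (fun a b : Int => a + 4 ≤ b)
      (fun a b : Int => a + 4 ≤ b) := ⟨fun h1 h2 => by omega⟩
  rw [List.isChain_iff_pairwise]
  constructor
  · intro h; exact h.imp (fun {a b} h => Or.inl h)
  · intro h
    exact (h.and hle).imp (fun {a b} h => by obtain ⟨h1, h2⟩ := h; unfold pvOK at h1; omega)

lemma pvRow_eq (pieces : List (Int × Int × Int)) (y : Int) :
    (pieces.foldl (fun d t => d.modify t.2.1 [] (· ++ [t.1])) PySem.Dict.empty).getD y []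
      = pvRow y pieces := by
  have h : pieces.foldl (fun d t => d.modify t.2.1 [] (· ++ [t.1])) PySem.Dict.empty
      = (pieces.map (fun t => (t.2.1, t.1))).foldl
          (fun d p => d.modify p.1 [] (· ++ [p.2])) PySem.Dict.empty := by
    rw [List.foldl_map]
  rw [h, PySem.Dict.getD_foldl_modify_append]
  simp [pvRow, List.filter_map, Function.comp_def]

lemma pvKeys (pieces : List (Int × Int × Int)) :
    (pieces.foldl (fun d t => d.modify t.2.1 [] (· ++ [t.1])) PySem.Dict.empty).keys
      = PySem.Set.ofList (pieces.map (fun t => t.2.1)) := by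
  rw [PySem.Dict.keys_foldl_modify_key]
  simp [PySem.Set.update_nil_left]

lemma pvRow_nil (pieces : List (Int × Int × Int)) (y : Int)
    (h : y ∉ pieces.map (fun t => t.2.1)) : pvRow y pieces = [] := by
  simp only [pvRow, List.map_eq_nil_iff, List.filter_eq_nil_iff]
  intro t ht hb
  exact h (List.mem_map.mpr ⟨t, ht, by simpa using hb⟩)

lemma pvB_iff (pieces : List (Int × Int × Int)) :
    is_valid_construct_alt pieces = true ↔ ∀ y : Int, List.Pairwise pvOK (pvRow y pieces) := by
  show ((pieces.foldl (fun d t => d.modify t.2.1 [] (· ++ [t.1]))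
    PySem.Dict.empty).values.all pvRowOK) = true ↔ _
  have hnd : (pieces.foldl (fun d t => d.modify t.2.1 [] (· ++ [t.1]))
      PySem.Dict.empty).keys.Nodup := by
    exact PySem.Dict.nodup_keys_foldl_modify_key pieces (fun t => t.2.1) []
      (fun d t => (· ++ [t.1])) PySem.Dict.empty (by simp)
  rw [PySem.Dict.values_eq_map_keys _ hnd []]
  simp only [List.all_map, List.all_eq_true, Function.comp]
  constructor
  · intro h y
    by_cases hy : y ∈ pieces.map (fun t => t.2.1)
    · have hk : y ∈ (pieces.foldl (fun d t => d.modify t.2.1 [] (· ++ [t.1]))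
          PySem.Dict.empty).keys := by
        rw [pvKeys]; exact (PySem.Set.mem_ofList _ _).mpr hy
      have := h y hk
      rw [pvRow_eq] at this
      exact (rowOK _).mp this
    · rw [pvRow_nil pieces y hy]; simp
  · intro h y _
    rw [pvRow_eq]
    exact (rowOK _).mpr (h y)

lemma pvRow_cons (y' x y c : Int) (t : List (Int × Int × Int)) :
    pvRow y' ((x, y, c) :: t) = if y = y' then x :: pvRow y' t else pvRow y' t := by
  simp only [pvRow, List.filter_cons]
  by_cases h : y = y' <;> simp [h]

lemma pvMem_row (y' b : Int) (t : List (Int × Int × Int)) :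
    b ∈ pvRow y' t ↔ ∃ q ∈ t, q.2.1 = y' ∧ q.1 = b := by
  simp only [pvRow, List.mem_map, List.mem_filter, beq_iff_eq]
  constructor
  · rintro ⟨q, ⟨hq, he⟩, hb⟩; exact ⟨q, hq, he, hb⟩
  · rintro ⟨q, hq, he, hb⟩; exact ⟨q, ⟨hq, he⟩, hb⟩

lemma pvPairwise_iff_rows (pieces : List (Int × Int × Int)) :
    List.Pairwise pvR pieces ↔ ∀ y : Int, List.Pairwise pvOK (pvRow y pieces) := by
  induction pieces with
  | nil => simp [pvRow]
  | cons hd t ih =>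
    obtain ⟨x, y, c⟩ := hd
    rw [List.pairwise_cons, ih]
    constructor
    · rintro ⟨hhd, ht⟩ y'
      rw [pvRow_cons]
      by_cases hy : y = y'
      · subst hy
        rw [if_pos rfl, List.pairwise_cons]
        refine ⟨?_, ht y⟩
        intro b hb
        obtain ⟨q, hq, he, hb⟩ := (pvMem_row y b t).mp hb
        subst hb
        exact hhd q hq he.symm
      · simpa [hy] using ht y'
    · intro h
      refine ⟨?_, fun y' => ?_⟩
      · intro q hq he
        have := h y
        rw [pvRow_cons, if_pos rfl, List.pairwise_cons] at this
        exact this.1 q.1 ((pvMem_row y q.1 t).mpr ⟨q, hq, he.symm, rfl⟩)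
      · have := h y'
        rw [pvRow_cons] at this
        by_cases hy : y = y'
        · subst hy; rw [if_pos rfl] at this; exact (List.pairwise_cons.mp this).2
        · rwa [if_neg hy] at this

-- ===== VERDICT (by name: the statement is the Claim_ definition above) =====
theorem is_valid_construct_spec : Claim_equal_is_valid_construct := by
  intro pieces _
  unfold Spec_is_valid_construct
  rw [Bool.eq_iff_iff, pvA_iff, pvB_iff, pvPairwise_iff_rows]
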